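-- pv_equiv track=rewrite | github.com/duyanhggg/Project | Python/UpdateCode/Updatefile.py | _detect_commit_type
-- ===== SOURCE A (Python) =====
-- def _detect_commit_type(status: str) -> str:
--     """Detect conventional commit type based on changes"""
--     lines = status.strip().split('\n')
--
--     # Check for new files
--     if any(line.startswith('??') or line.startswith('A ') for line in lines):
--         return "feat"
--
--     # Check for deletions
--     if any(line.startswith('D ') for line in lines):
--         return "refactor"
--
--     # Check for modifications
--     if any(line.startswith('M ') for line in lines):
--         # Check if it's documentation
--         if any('.md' in line or 'README' in line for line in lines):
--             return "docs"
--         # Check if it's config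
--         if any(('.json' in line or '.yaml' in line or '.yml' in line or '.toml' in line) for line in lines):
--             return "chore"
--         return "fix"
--
--     return "chore"
-- ===== SOURCE B (Python) =====
-- def _detect_commit_type(status: str) -> str:
--     """Detect conventional commit type based on changes (single-pass flag version)"""
--     lines = status.strip().split('\n')
--     has_new = has_delete = has_modify = has_docs = has_config = False
--     for line in lines:
--         if line.startswith('??') or line.startswith('A '):
--             has_new = True
--         if line.startswith('D '):
--             has_delete = True
--         if line.startswith('M '):
--             has_modify = True
--         if '.md' in line or 'README' in line:
--             has_docs = True
--         if '.json' in line or '.yaml' in line or '.yml' in line or '.toml' in line: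
--             has_config = True
--     if has_new:
--         return "feat"
--     if has_delete:
--         return "refactor"
--     if has_modify:
--         if has_docs:
--             return "docs"
--         if has_config:
--             return "chore"
--         return "fix"
--     return "chore"
-- ===== Notes on version B (the rewrite author's own statement) =====
-- stated objective: alternative
-- what changed: Replaces A's six separate any(...) scans over the lines with a single loop that accumulates five boolean flags, then applies the same priority cascade to the flags.
import Mathlib
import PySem

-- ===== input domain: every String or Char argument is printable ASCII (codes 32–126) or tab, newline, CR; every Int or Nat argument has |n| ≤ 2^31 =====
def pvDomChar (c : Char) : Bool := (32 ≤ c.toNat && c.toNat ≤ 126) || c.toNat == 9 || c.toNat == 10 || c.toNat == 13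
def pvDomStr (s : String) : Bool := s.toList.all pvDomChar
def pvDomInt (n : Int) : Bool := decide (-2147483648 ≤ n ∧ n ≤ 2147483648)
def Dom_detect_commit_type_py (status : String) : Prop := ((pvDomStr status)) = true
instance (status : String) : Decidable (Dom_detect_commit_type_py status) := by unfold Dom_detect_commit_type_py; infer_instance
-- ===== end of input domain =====

-- B replaces A's six separate any(...) scans with one pass accumulating five boolean flags ('alternative'; same cascade on the flags).

-- ===== PORT A =====
def detect_commit_type_py (status : String) : String :=
  let lines := (PySem.Str.split? (PySem.Str.strip status) "\n").getD []  -- sep ≠ "" so split? is some; exact s.strip().split(chr(10))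
  if lines.any (fun line => PySem.Str.startswith line "??" || PySem.Str.startswith line "A ") then
    "feat"
  else if lines.any (fun line => PySem.Str.startswith line "D ") then
    "refactor"
  else if lines.any (fun line => PySem.Str.startswith line "M ") then
    if lines.any (fun line => PySem.Str.isIn ".md" line || PySem.Str.isIn "README" line) then
      "docs"
    else if lines.any (fun line => PySem.Str.isIn ".json" line || PySem.Str.isIn ".yaml" line ||
        PySem.Str.isIn ".yml" line || PySem.Str.isIn ".toml" line) then
      "chore"
    else
      "fix"
  else
    "chore"

-- ===== PORT B =====
-- one pass over lines updating five flags ('if cond: flag = True' = flag || cond)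
def detect_commit_type_py_alt (status : String) : String :=
  let lines := (PySem.Str.split? (PySem.Str.strip status) "\n").getD []  -- sep ≠ "" so split? is some; exact s.strip().split(chr(10))
  let flags := lines.foldl
    (fun (f : Bool × Bool × Bool × Bool × Bool) line =>
      ( f.1 || (PySem.Str.startswith line "??" || PySem.Str.startswith line "A "),
        f.2.1 || PySem.Str.startswith line "D ",
        f.2.2.1 || PySem.Str.startswith line "M ",
        f.2.2.2.1 || (PySem.Str.isIn ".md" line || PySem.Str.isIn "README" line),
        f.2.2.2.2 || (PySem.Str.isIn ".json" line || PySem.Str.isIn ".yaml" line ||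
          PySem.Str.isIn ".yml" line || PySem.Str.isIn ".toml" line) ))
    (false, false, false, false, false)
  if flags.1 then "feat"
  else if flags.2.1 then "refactor"
  else if flags.2.2.1 then
    if flags.2.2.2.1 then "docs"
    else if flags.2.2.2.2 then "chore"
    else "fix"
  else "chore"

-- ===== PRECONDITION & SPEC =====
def Spec_detect_commit_type_py (status : String) (out : String) : Prop := out = detect_commit_type_py_alt status
instance (status : String) (out : String) : Decidable (Spec_detect_commit_type_py status out) := by unfold Spec_detect_commit_type_py; infer_instance

-- ===== CLAIM (what is proved, stated in full; the proofs are below) =====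
def Claim_equal_detect_commit_type_py : Prop := ∀ (status : String), Dom_detect_commit_type_py status → Spec_detect_commit_type_py status (detect_commit_type_py status)

-- ===== LEMMAS AND PROOFS =====

-- folding ||-updates of five independent flags computes the five List.any's
theorem pv_foldl_flags (p1 p2 p3 p4 p5 : String → Bool) :
    ∀ (l : List String) (f : Bool × Bool × Bool × Bool × Bool),
    l.foldl (fun f line =>
        (f.1 || p1 line, f.2.1 || p2 line, f.2.2.1 || p3 line,
         f.2.2.2.1 || p4 line, f.2.2.2.2 || p5 line)) f
      = (f.1 || l.any p1, f.2.1 || l.any p2, f.2.2.1 || l.any p3,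
         f.2.2.2.1 || l.any p4, f.2.2.2.2 || l.any p5) := by
  intro l
  induction l with
  | nil => intro f; simp
  | cons x xs ih =>
    intro f
    simp [List.foldl_cons, ih, Bool.or_assoc]

-- ===== VERDICT (by name: the statement is the Claim_ definition above) =====
theorem detect_commit_type_py_spec : Claim_equal_detect_commit_type_py := by
  intro status _
  unfold Spec_detect_commit_type_py detect_commit_type_py detect_commit_type_py_alt
  simp only [pv_foldl_flags, Bool.false_or]
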